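-- pv_equiv track=rewrite | github.com/albertopha/ds-algo | BT/Embolden/Embolden.py | solve
-- ===== SOURCE A (Python) =====
-- def solve(text, patterns):
--     if not text or not patterns:
--         return text
--
--     found = [False] * len(text)
--     seen = set()
--
--     for pattern in patterns:
--         if pattern in seen:
--             continue
--         seen.add(pattern)
--
--         i = 0
--         while i < len(text):
--             i = text.find(pattern, i)
--             if i == -1:
--                 break
--
--             for j in range(i, i+len(pattern)):
--                 found[j] = True
--
--             i += 1
--
--     output = []
--     i = 0
--     while i < len(text):
--         if not found[i]:
--             output.append(text[i])
--             i += 1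
--             continue
--         start = i
--         while i < len(text) and found[i]:
--             i += 1
--         output.append('<b>%s</b>' %text[start:i])
--     return "".join(output)
-- ===== SOURCE B (Python) =====
-- def solve(text, patterns):
--     n = len(text)
--     # farthest match length starting at each position
--     reach = []
--     for i in range(n):
--         best = 0
--         for p in patterns:
--             lp = len(p)
--             if lp > best and text[i:i+lp] == p:
--                 best = lp
--         reach.append(best)
--     # single flagged pass: extend the covered frontier, emit tags at transitions
--     out = []
--     bold_until = 0
--     in_bold = False
--     for i in range(n):
--         r = i + reach[i]
--         if r > bold_until:
--             bold_until = r
--         if i < bold_until: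
--             if not in_bold:
--                 out.append("<b>")
--                 in_bold = True
--         else:
--             if in_bold:
--                 out.append("</b>")
--                 in_bold = False
--         out.append(text[i])
--     if in_bold:
--         out.append("</b>")
--     return "".join(out)
-- ===== Notes on version B (the rewrite author's own statement) =====
-- stated objective: alternative
-- what changed: A runs a find-loop per pattern marking a boolean array and then scans it for runs; B instead computes per position the longest pattern match starting there and renders the output in one flagged pass that extends a max-reach bold frontier and emits tags at transitions.
import Mathlib
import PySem

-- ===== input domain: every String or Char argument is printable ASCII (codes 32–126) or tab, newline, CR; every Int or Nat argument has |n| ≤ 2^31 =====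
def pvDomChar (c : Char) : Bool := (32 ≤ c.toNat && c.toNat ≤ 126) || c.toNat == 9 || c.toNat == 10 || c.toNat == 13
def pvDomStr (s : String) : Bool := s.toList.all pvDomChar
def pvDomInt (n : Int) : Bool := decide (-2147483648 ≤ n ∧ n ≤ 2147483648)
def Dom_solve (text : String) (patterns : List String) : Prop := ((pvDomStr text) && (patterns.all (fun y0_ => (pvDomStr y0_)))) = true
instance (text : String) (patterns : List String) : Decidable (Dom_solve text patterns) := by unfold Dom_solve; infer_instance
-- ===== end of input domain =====

-- B re-implements A's per-pattern find/mark/boolean-array algorithm as a per-position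
-- max-match-reach scan with a single flagged pass emitting the tags (objective: alternative).

-- ===== PORT A =====

-- for j in range(i, i+len): found[j] = True
def pvMark (found : List Bool) (i len : Nat) : List Bool :=
  (List.range' i len).foldl (fun f j => f.set j true) found

-- i = 0; while i < len(text): i = text.find(pattern, i); …; i += 1
-- (fuel-based structural recursion: the start index strictly increases each pass,
--  so len(text)+1 passes always suffice and the fuel never runs out)
def pvFindLoop (cs p : List Char) : Nat → Nat → List Bool → List Bool
  | 0, _, found => found
  | fuel + 1, i, found =>
    if i < cs.length then
      if PySem.Chars.findFrom cs p (i : Int) = -1 then found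
      else pvFindLoop cs p fuel ((PySem.Chars.findFrom cs p (i : Int)).toNat + 1)
             (pvMark found (PySem.Chars.findFrom cs p (i : Int)).toNat p.length)
    else found

-- one iteration of 'for pattern in patterns' (with the 'seen' dedup set)
def pvStep (cs : List Char) (st : List Bool × PySem.Set String) (pattern : String) :
    List Bool × PySem.Set String :=
  if PySem.Set.contains st.2 pattern then st
  else (pvFindLoop cs pattern.toList (cs.length + 1) 0 st.1, PySem.Set.add st.2 pattern)

def pvPhase1 (cs : List Char) (patterns : List String) : List Bool :=
  (patterns.foldl (pvStep cs) (List.replicate cs.length false, PySem.Set.empty)).1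

-- while i < len(text) and found[i]: i += 1  (fuel n+1 always suffices)
def pvRunEnd (n : Nat) (found : List Bool) : Nat → Nat → Nat
  | 0, i => i
  | fuel + 1, i =>
    if i < n ∧ found.getD i false = true then pvRunEnd n found fuel (i + 1) else i

-- the output-building while loop (suffix form: the chunks appended from position i on;
--  the position advances every pass, so fuel len(text)+1 always suffices)
def pvPhase2 (cs : List Char) (found : List Bool) : Nat → Nat → List Char
  | 0, _ => []
  | fuel + 1, i =>
    if i < cs.length then
      if found.getD i false = false then
        [cs.getD i ' '] ++ pvPhase2 cs found fuel (i + 1)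
      else
        ("<b>".toList
            ++ PySem.List.slice cs (some (i : Int))
                (some ((pvRunEnd cs.length found (cs.length + 1) i : Nat) : Int))
            ++ "</b>".toList)
          ++ pvPhase2 cs found fuel (pvRunEnd cs.length found (cs.length + 1) i)
    else []

def solve (text : String) (patterns : List String) : String :=
  if text = "" ∨ patterns = [] then text
  else String.ofList
    (pvPhase2 text.toList (pvPhase1 text.toList patterns) (text.toList.length + 1) 0)

-- ===== PORT B =====

-- best = max(len(p) for p matching at i), via the inner for-loop
def pvBest (cs : List Char) (patterns : List String) (i : Nat) : Nat :=
  patterns.foldl (fun best p =>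
    if p.toList.length > best ∧
        PySem.List.slice cs (some (i : Int)) (some ((i : Int) + (p.toList.length : Int))) = p.toList
    then p.toList.length else best) 0

-- reach = [best(i) for i in range(n)]
def pvReach (cs : List Char) (patterns : List String) : List Nat :=
  (List.range cs.length).map (pvBest cs patterns)

-- the single flagged pass (suffix form: chunks emitted from position i on;
--  one fuel unit per position, fuel = len(text) exactly)
def pvBLoop (cs : List Char) (reach : List Nat) : Nat → Nat → Nat → Bool → List Char
  | 0, _, _, ib => if ib then "</b>".toList else []
  | fuel + 1, i, bu, ib =>
    if i < cs.length then
      -- r = i + reach[i]; if r > bold_until: bold_until = r   (inlined below)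
      if i < (if i + reach.getD i 0 > bu then i + reach.getD i 0 else bu) then
        (if ib then [] else "<b>".toList) ++ [cs.getD i ' ']
          ++ pvBLoop cs reach fuel (i + 1)
              (if i + reach.getD i 0 > bu then i + reach.getD i 0 else bu) true
      else
        (if ib then "</b>".toList else []) ++ [cs.getD i ' ']
          ++ pvBLoop cs reach fuel (i + 1)
              (if i + reach.getD i 0 > bu then i + reach.getD i 0 else bu) false
    else if ib then "</b>".toList else []

def solve_alt (text : String) (patterns : List String) : String :=
  String.ofList
    (pvBLoop text.toList (pvReach text.toList patterns) text.toList.length 0 0 false)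

-- ===== PRECONDITION & SPEC =====
def Spec_solve (text : String) (patterns : List String) (out : String) : Prop := out = solve_alt text patterns
instance (text : String) (patterns : List String) (out : String) : Decidable (Spec_solve text patterns out) := by unfold Spec_solve; infer_instance

-- ===== CLAIM (what is proved, stated in full; the proofs are below) =====
def Claim_equal_solve : Prop := ∀ (text : String) (patterns : List String), Dom_solve text patterns → Spec_solve text patterns (solve text patterns)

-- ===== LEMMAS AND PROOFS =====

-- 'position j of text is inside some occurrence of some pattern'
def pvCovered (cs : List Char) (patterns : List String) (j : Nat) : Prop :=
  ∃ p ∈ patterns, ∃ k, k ≤ j ∧ j < k + p.toList.length ∧ p.toList <+: cs.drop k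

-- running maximum of k + best-match-length over k < j  (B's bold frontier)
def pvPM (cs : List Char) (patterns : List String) : Nat → Nat
  | 0 => 0
  | (j + 1) => max (pvPM cs patterns j) (j + pvBest cs patterns j)

-- common renderer: one pass over positions with the previous position's mask bit
def pvG (cs : List Char) (mask : Nat → Bool) (i : Nat) (prev : Bool) : List Char :=
  if _h : i < cs.length then
    (if prev && !mask i then "</b>".toList else if !prev && mask i then "<b>".toList else [])
      ++ [cs.getD i ' '] ++ pvG cs mask (i + 1) (mask i)
  else if prev then "</b>".toList else []
termination_by cs.length - i

theorem pvG_unfold (cs : List Char) (mask : Nat → Bool) (i : Nat) (prev : Bool) :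
    pvG cs mask i prev =
      if i < cs.length then
        ((if prev && !mask i then "</b>".toList else if !prev && mask i then "<b>".toList else [])
          ++ [cs.getD i ' '] ++ pvG cs mask (i + 1) (mask i))
      else (if prev then "</b>".toList else []) := by
  by_cases hi : i < cs.length
  · rw [pvG, dif_pos hi, if_pos hi]
  · rw [pvG, dif_neg hi, if_neg hi]

theorem pvBLoop_unfold (cs : List Char) (reach : List Nat) (fuel i bu : Nat) (ib : Bool) :
    pvBLoop cs reach (fuel + 1) i bu ib =
      if i < cs.length then
        (if i < (if i + reach.getD i 0 > bu then i + reach.getD i 0 else bu) then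
          (if ib then [] else "<b>".toList) ++ [cs.getD i ' ']
            ++ pvBLoop cs reach fuel (i + 1)
                (if i + reach.getD i 0 > bu then i + reach.getD i 0 else bu) true
        else
          (if ib then "</b>".toList else []) ++ [cs.getD i ' ']
            ++ pvBLoop cs reach fuel (i + 1)
                (if i + reach.getD i 0 > bu then i + reach.getD i 0 else bu) false)
      else (if ib then "</b>".toList else []) := rfl

theorem pvPhase2_unfold (cs : List Char) (found : List Bool) (fuel i : Nat) :
    pvPhase2 cs found (fuel + 1) i =
      if i < cs.length then
        (if found.getD i false = false then [cs.getD i ' '] ++ pvPhase2 cs found fuel (i + 1)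
         else
          ("<b>".toList
              ++ PySem.List.slice cs (some (i : Int))
                  (some ((pvRunEnd cs.length found (cs.length + 1) i : Nat) : Int))
              ++ "</b>".toList)
            ++ pvPhase2 cs found fuel (pvRunEnd cs.length found (cs.length + 1) i))
      else [] := rfl

-- ---- A side: the boolean array marks exactly the covered positions ----

theorem pvFoldSet_length (l : List Nat) (f : List Bool) :
    (l.foldl (fun f j => f.set j true) f).length = f.length := by
  induction l generalizing f with
  | nil => rfl
  | cons a t ih => simpa using ih (f.set a true)

theorem pvMark_length (found : List Bool) (i len : Nat) :
    (pvMark found i len).length = found.length := by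
  unfold pvMark; exact pvFoldSet_length _ _

theorem pvMark_getD (found : List Bool) (i len j : Nat) :
    (pvMark found i len).getD j false =
      (found.getD j false || decide (i ≤ j ∧ j < i + len ∧ j < found.length)) := by
  induction len generalizing i found with
  | zero =>
    have h : ¬ (i ≤ j ∧ j < i + 0 ∧ j < found.length) := by omega
    rw [show pvMark found i 0 = found from rfl, decide_eq_false h, Bool.or_false]
  | succ len ih =>
    have hstep : pvMark found i (len + 1) = pvMark (found.set i true) (i + 1) len := by
      unfold pvMark; rw [List.range'_succ, List.foldl_cons]
    rw [hstep, ih]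
    by_cases hij : i = j
    · subst hij
      by_cases hl : i < found.length
      · have h2 : i ≤ i ∧ i < i + (len + 1) ∧ i < found.length := ⟨le_refl i, by omega, hl⟩
        simp [List.getD_eq_getElem?_getD, List.getElem?_set, hl, h2]
      · have hle : found.length ≤ i := by omega
        have h1 : ¬ (i + 1 ≤ i ∧ i < i + 1 + len ∧ i < (found.set i true).length) := by omega
        have h2 : ¬ (i ≤ i ∧ i < i + (len + 1) ∧ i < found.length) := by omega
        simp [List.getD_eq_getElem?_getD, List.getElem?_set, hl, h1, h2]
    · have hiff : (i + 1 ≤ j ∧ j < i + 1 + len ∧ j < (found.set i true).length) ↔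
          (i ≤ j ∧ j < i + (len + 1) ∧ j < found.length) := by
        simp only [List.length_set]; omega
      rw [decide_eq_decide.mpr hiff]
      have : (found.set i true).getD j false = found.getD j false := by
        simp [List.getD_eq_getElem?_getD, List.getElem?_set, hij]
      rw [this]

theorem pvFindLoop_length (cs p : List Char) (fuel i : Nat) (found : List Bool) :
    (pvFindLoop cs p fuel i found).length = found.length := by
  induction fuel generalizing i found with
  | zero => rfl
  | succ fuel ih =>
    rw [pvFindLoop]
    split
    · split
      · rfl
      · rw [ih, pvMark_length]
    · rfl

theorem pvFindLoop_getD (cs p : List Char) (fuel i : Nat) (found : List Bool) (j : Nat)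
    (hfuel : cs.length ≤ i + fuel)
    (hj : j < cs.length) (hlen : found.length = cs.length) :
    ((pvFindLoop cs p fuel i found).getD j false = true ↔
      (found.getD j false = true ∨
        ∃ k, i ≤ k ∧ k ≤ j ∧ j < k + p.length ∧ p <+: cs.drop k)) := by
  have aux : ∀ fuel i found, cs.length ≤ i + fuel → found.length = cs.length →
      ((pvFindLoop cs p fuel i found).getD j false = true ↔
        (found.getD j false = true ∨
          ∃ k, i ≤ k ∧ k ≤ j ∧ j < k + p.length ∧ p <+: cs.drop k)) := by
    intro fuel
    induction fuel with
    | zero =>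
      intro i found hd hlen
      show (found.getD j false = true ↔ _)
      constructor
      · exact Or.inl
      · rintro (h | ⟨k, hik, hkj, _, _⟩)
        · exact h
        · omega
    | succ fuel ih =>
      intro i found hd hlen
      rw [pvFindLoop]
      by_cases h : i < cs.length
      · rw [if_pos h]
        by_cases hm : PySem.Chars.findFrom cs p (i : Int) = -1
        · rw [if_pos hm]
          have hno : ¬ p <:+: List.drop i cs :=
            (PySem.Chars.findFrom_natCast_eq_neg_one_iff cs p i (le_of_lt h)).mp hm
          constructor
          · exact Or.inl
          · rintro (hf | ⟨k, hik, hkj, hjk, hp⟩)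
            · exact hf
            · exfalso
              apply hno
              have hdd : List.drop k cs = List.drop (k - i) (List.drop i cs) := by
                rw [List.drop_drop]; congr 1; omega
              rw [hdd] at hp
              exact hp.isInfix.trans (List.drop_suffix _ _).isInfix
        · rw [if_neg hm]
          obtain ⟨hge, hpref, hmin⟩ :=
            PySem.Chars.findFrom_natCast_spec cs p i (le_of_lt h) hm
          have hge' : i ≤ (PySem.Chars.findFrom cs p (i : Int)).toNat := by omega
          rw [ih _ _ (by omega) (by rw [pvMark_length]; exact hlen)]
          rw [pvMark_getD]
          simp only [Bool.or_eq_true, decide_eq_true_eq]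
          constructor
          · rintro ((hf | ⟨h1, h2, _⟩) | ⟨k, hk1, hk2, hk3, hk4⟩)
            · exact Or.inl hf
            · exact Or.inr ⟨_, hge', h1, h2, hpref⟩
            · exact Or.inr ⟨k, by omega, hk2, hk3, hk4⟩
          · rintro (hf | ⟨k, hik, hkj, hjk, hp⟩)
            · exact Or.inl (Or.inl hf)
            · rcases lt_trichotomy k (PySem.Chars.findFrom cs p (i : Int)).toNat with hlt | heq | hgt
              · exact absurd hp (hmin k hik hlt)
              · subst heq
                exact Or.inl (Or.inr ⟨by omega, by omega, by omega⟩)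
              · exact Or.inr ⟨k, by omega, hkj, hjk, hp⟩
      · rw [if_neg h]
        constructor
        · exact Or.inl
        · rintro (hf | ⟨k, hik, hkj, _, _⟩)
          · exact hf
          · omega
  exact aux fuel i found hfuel hlen

theorem pvStep_fst_length (cs : List Char) (st : List Bool × PySem.Set String) (a : String) :
    (pvStep cs st a).1.length = st.1.length := by
  unfold pvStep
  split
  · rfl
  · exact pvFindLoop_length _ _ _ _ _

theorem pvPhase1_aux (cs : List Char) (j : Nat) (hj : j < cs.length) :
    ∀ (ps : List String) (st : List Bool × PySem.Set String), st.1.length = cs.length →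
      ((ps.foldl (pvStep cs) st).1.getD j false = true ↔
        (st.1.getD j false = true ∨ ∃ p ∈ ps, p ∉ st.2 ∧
          ∃ k, k ≤ j ∧ j < k + p.toList.length ∧ p.toList <+: cs.drop k)) := by
  intro ps
  induction ps with
  | nil => intro st _; simp
  | cons a ps ih =>
    intro st hlen
    rw [List.foldl_cons]
    have hmem_iff : PySem.Set.contains st.2 a = true ↔ a ∈ st.2 := by
      simp [PySem.Set.contains]
    by_cases hc : PySem.Set.contains st.2 a = true
    · have hmem : a ∈ st.2 := hmem_iff.mp hc
      rw [show pvStep cs st a = st by unfold pvStep; rw [if_pos hc]]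
      rw [ih st hlen]
      constructor
      · rintro (hf | ⟨p, hp, hns, hocc⟩)
        · exact Or.inl hf
        · exact Or.inr ⟨p, List.mem_cons_of_mem _ hp, hns, hocc⟩
      · rintro (hf | ⟨p, hp, hns, hocc⟩)
        · exact Or.inl hf
        · rcases List.mem_cons.mp hp with rfl | hp'
          · exact absurd hmem hns
          · exact Or.inr ⟨p, hp', hns, hocc⟩
    · have hmem : a ∉ st.2 := fun hm => hc (hmem_iff.mpr hm)
      rw [show pvStep cs st a
            = (pvFindLoop cs a.toList (cs.length + 1) 0 st.1, PySem.Set.add st.2 a) by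
        unfold pvStep; rw [if_neg hc]]
      rw [ih _ (by rw [pvFindLoop_length]; exact hlen)]
      rw [pvFindLoop_getD cs a.toList (cs.length + 1) 0 st.1 j (by omega) hj hlen]
      constructor
      · rintro ((hf | ⟨k, _, hk1, hk2, hk3⟩) | ⟨p, hp, hns, hocc⟩)
        · exact Or.inl hf
        · exact Or.inr ⟨a, List.mem_cons_self, hmem, k, hk1, hk2, hk3⟩
        · have hns' : p ∉ st.2 := fun hm => hns ((PySem.Set.mem_add st.2 a p).mpr (Or.inl hm))
          exact Or.inr ⟨p, List.mem_cons_of_mem _ hp, hns', hocc⟩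
      · rintro (hf | ⟨p, hp, hns, k, hk1, hk2, hk3⟩)
        · exact Or.inl (Or.inl hf)
        · rcases List.mem_cons.mp hp with rfl | hp'
          · exact Or.inl (Or.inr ⟨k, by omega, hk1, hk2, hk3⟩)
          · by_cases hpa : p = a
            · subst hpa
              exact Or.inl (Or.inr ⟨k, by omega, hk1, hk2, hk3⟩)
            · have : p ∉ PySem.Set.add st.2 a := fun hm => by
                rcases (PySem.Set.mem_add st.2 a p).mp hm with h' | h'
                · exact hns h'
                · exact hpa h'
              exact Or.inr ⟨p, hp', this, k, hk1, hk2, hk3⟩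

theorem pvPhase1_getD (cs : List Char) (patterns : List String) (j : Nat) (hj : j < cs.length) :
    ((pvPhase1 cs patterns).getD j false = true) ↔ pvCovered cs patterns j := by
  unfold pvPhase1
  rw [pvPhase1_aux cs j hj patterns _ (by simp)]
  unfold pvCovered
  constructor
  · rintro (hf | ⟨p, hp, _, hocc⟩)
    · simp at hf
    · exact ⟨p, hp, hocc⟩
  · rintro ⟨p, hp, hocc⟩
    exact Or.inr ⟨p, hp, by simp [PySem.Set.empty], hocc⟩

-- ---- run-end properties of A's inner output loop ----

theorem pvRunEnd_ge (n : Nat) (found : List Bool) :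
    ∀ fuel i, i ≤ pvRunEnd n found fuel i := by
  intro fuel
  induction fuel with
  | zero => intro i; exact le_refl i
  | succ fuel ih =>
    intro i
    rw [pvRunEnd]
    split
    · have := ih (i + 1); omega
    · exact le_refl i

theorem pvRunEnd_gt (n : Nat) (found : List Bool) (fuel i : Nat)
    (h1 : i < n) (h2 : found.getD i false = true) :
    i < pvRunEnd n found (fuel + 1) i := by
  rw [pvRunEnd]
  have h : i < n ∧ found.getD i false = true := ⟨h1, h2⟩
  rw [if_pos h]
  have := pvRunEnd_ge n found fuel (i + 1)
  omega

theorem pvRunEnd_spec (n : Nat) (found : List Bool) (fuel i : Nat) (hfuel : n ≤ i + fuel) :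
    i ≤ pvRunEnd n found fuel i ∧ (i ≤ n → pvRunEnd n found fuel i ≤ n) ∧
    (∀ t, i ≤ t → t < pvRunEnd n found fuel i → found.getD t false = true) ∧
    (pvRunEnd n found fuel i < n → found.getD (pvRunEnd n found fuel i) false = false) := by
  induction fuel generalizing i with
  | zero =>
    show i ≤ pvRunEnd n found 0 i ∧ _ ∧ _ ∧ _
    rw [show pvRunEnd n found 0 i = i from rfl]
    exact ⟨le_refl _, fun h' => h', fun t h1 h2 => absurd h1 (by omega),
      fun hlt => absurd hlt (by omega)⟩
  | succ fuel ih =>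
    rw [pvRunEnd]
    split
    · rename_i h
      have IH := ih (i + 1) (by omega)
      refine ⟨by omega, fun _ => IH.2.1 (by omega), fun t h1 h2 => ?_, IH.2.2.2⟩
      rcases Nat.eq_or_lt_of_le h1 with rfl | h1'
      · exact h.2
      · exact IH.2.2.1 t (by omega) h2
    · rename_i h
      refine ⟨le_refl _, fun h' => h', fun t h1 h2 => absurd h1 (by omega), fun hlt => ?_⟩
      cases hfound : found.getD i false
      · rfl
      · exact absurd ⟨hlt, hfound⟩ h

-- ---- B side: the frontier bit is the covering predicate ----

theorem pvBest_spec (cs : List Char) (patterns : List String) (i j : Nat) (hij : i ≤ j) :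
    (j < i + pvBest cs patterns i) ↔
      ∃ p ∈ patterns, p.toList <+: cs.drop i ∧ j < i + p.toList.length := by
  have hsl : ∀ p : String,
      (PySem.List.slice cs (some (i : Int)) (some ((i : Int) + (p.toList.length : Int)))
        = p.toList) ↔ p.toList <+: cs.drop i := by
    intro p
    rw [PySem.List.slice_natCast_add]
    constructor
    · intro h; exact List.prefix_iff_eq_take.mpr h.symm
    · intro h; exact (List.prefix_iff_eq_take.mp h).symm
  have aux : ∀ (ps : List String) (b : Nat),
      b ≤ ps.foldl (fun best p =>
        if p.toList.length > best ∧
            PySem.List.slice cs (some (i : Int)) (some ((i : Int) + (p.toList.length : Int))) = p.toList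
        then p.toList.length else best) b ∧
      (ps.foldl (fun best p =>
        if p.toList.length > best ∧
            PySem.List.slice cs (some (i : Int)) (some ((i : Int) + (p.toList.length : Int))) = p.toList
        then p.toList.length else best) b = b ∨
        ∃ p ∈ ps, p.toList <+: cs.drop i ∧ ps.foldl (fun best p =>
        if p.toList.length > best ∧
            PySem.List.slice cs (some (i : Int)) (some ((i : Int) + (p.toList.length : Int))) = p.toList
        then p.toList.length else best) b = p.toList.length) ∧
      (∀ p ∈ ps, p.toList <+: cs.drop i → p.toList.length ≤ ps.foldl (fun best p =>
        if p.toList.length > best ∧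
            PySem.List.slice cs (some (i : Int)) (some ((i : Int) + (p.toList.length : Int))) = p.toList
        then p.toList.length else best) b) := by
    intro ps
    induction ps with
    | nil => intro b; exact ⟨le_refl _, Or.inl rfl, by simp⟩
    | cons a ps ih =>
      intro b
      simp only [List.foldl_cons]
      by_cases hc : a.toList.length > b ∧
          PySem.List.slice cs (some (i : Int)) (some ((i : Int) + (a.toList.length : Int))) = a.toList
      · rw [if_pos hc]
        obtain ⟨ih1, ih2, ih3⟩ := ih a.toList.length
        refine ⟨by omega, ?_, ?_⟩
        · rcases ih2 with h | ⟨p, hp, hpref, hF⟩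
          · exact Or.inr ⟨a, List.mem_cons_self, (hsl a).mp hc.2, h⟩
          · exact Or.inr ⟨p, List.mem_cons_of_mem _ hp, hpref, hF⟩
        · intro p hp hpref
          rcases List.mem_cons.mp hp with rfl | hp'
          · omega
          · exact ih3 p hp' hpref
      · rw [if_neg hc]
        obtain ⟨ih1, ih2, ih3⟩ := ih b
        refine ⟨ih1, ?_, ?_⟩
        · rcases ih2 with h | ⟨p, hp, hpref, hF⟩
          · exact Or.inl h
          · exact Or.inr ⟨p, List.mem_cons_of_mem _ hp, hpref, hF⟩
        · intro p hp hpref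
          rcases List.mem_cons.mp hp with rfl | hp'
          · have : ¬ p.toList.length > b := fun hgt => hc ⟨hgt, (hsl p).mpr hpref⟩
            omega
          · exact ih3 p hp' hpref
  obtain ⟨h1, h2, h3⟩ := aux patterns 0
  unfold pvBest
  constructor
  · intro hj2
    rcases h2 with hF | ⟨p, hp, hpref, hF⟩
    · omega
    · exact ⟨p, hp, hpref, by omega⟩
  · rintro ⟨p, hp, hpref, hlt⟩
    have := h3 p hp hpref
    omega

theorem pvPM_lt_iff (cs : List Char) (patterns : List String) (j t : Nat) :
    t < pvPM cs patterns j ↔ ∃ k, k < j ∧ t < k + pvBest cs patterns k := by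
  induction j with
  | zero =>
    constructor
    · intro h; exact absurd h (by simp [pvPM])
    · rintro ⟨k, hk, _⟩; omega
  | succ j ih =>
    rw [pvPM, lt_max_iff, ih]
    constructor
    · rintro (⟨k, hk, h⟩ | h)
      · exact ⟨k, by omega, h⟩
      · exact ⟨j, by omega, h⟩
    · rintro ⟨k, hk, h⟩
      rcases Nat.lt_succ_iff_lt_or_eq.mp hk with hk' | rfl
      · exact Or.inl ⟨k, hk', h⟩
      · exact Or.inr h

theorem pvMaskB_iff (cs : List Char) (patterns : List String) (i : Nat) :
    (i < pvPM cs patterns (i + 1)) ↔ pvCovered cs patterns i := by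
  rw [pvPM_lt_iff]
  unfold pvCovered
  constructor
  · rintro ⟨k, hk, hlt⟩
    obtain ⟨p, hp, hpref, hilt⟩ := (pvBest_spec cs patterns k i (by omega)).mp hlt
    exact ⟨p, hp, k, by omega, hilt, hpref⟩
  · rintro ⟨p, hp, k, hk, hj, hpref⟩
    exact ⟨k, by omega, (pvBest_spec cs patterns k i hk).mpr ⟨p, hp, hpref, hj⟩⟩

-- ---- both output loops equal the common renderer ----

theorem pvG_congr (cs : List Char) (m1 m2 : Nat → Bool)
    (h : ∀ j, j < cs.length → m1 j = m2 j) :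
    ∀ i prev, pvG cs m1 i prev = pvG cs m2 i prev := by
  have aux : ∀ d i prev, cs.length - i ≤ d → pvG cs m1 i prev = pvG cs m2 i prev := by
    intro d
    induction d with
    | zero =>
      intro i prev hd
      have hi : ¬ i < cs.length := by omega
      rw [pvG_unfold cs m1 i prev, pvG_unfold cs m2 i prev, if_neg hi, if_neg hi]
    | succ d ih =>
      intro i prev hd
      rw [pvG_unfold cs m1 i prev, pvG_unfold cs m2 i prev]
      by_cases hi : i < cs.length
      · rw [if_pos hi, if_pos hi, h i hi, ih (i + 1) (m2 i) (by omega)]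
      · rw [if_neg hi, if_neg hi]
  intro i prev
  exact aux cs.length i prev (by omega)

theorem pvG_all_false (cs : List Char) (mask : Nat → Bool)
    (h : ∀ j, j < cs.length → mask j = false) :
    ∀ i, pvG cs mask i false = cs.drop i := by
  have aux : ∀ d i, cs.length - i ≤ d → pvG cs mask i false = cs.drop i := by
    intro d
    induction d with
    | zero =>
      intro i hd
      have hi : ¬ i < cs.length := by omega
      rw [pvG_unfold, if_neg hi, if_neg (by simp), List.drop_eq_nil_of_le (by omega)]
    | succ d ih =>
      intro i hd
      rw [pvG_unfold]
      by_cases hi : i < cs.length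
      · rw [if_pos hi, h i hi, ih (i + 1) (by omega),
            List.drop_eq_getElem_cons hi, List.getD_eq_getElem _ _ hi]
        simp
      · rw [if_neg hi, if_neg (by simp), List.drop_eq_nil_of_le (by omega)]
  intro i
  exact aux cs.length i (by omega)

theorem pvBLoop_eq_G (cs : List Char) (patterns : List String) :
    ∀ fuel i bu ib, cs.length ≤ i + fuel → bu = pvPM cs patterns i →
      pvBLoop cs (pvReach cs patterns) fuel i bu ib =
        pvG cs (fun j => decide (j < pvPM cs patterns (j + 1))) i ib := by
  intro fuel
  induction fuel with
  | zero =>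
    intro i bu ib hd hbu
    have hi : ¬ i < cs.length := by omega
    rw [show pvBLoop cs (pvReach cs patterns) 0 i bu ib
          = (if ib then "</b>".toList else []) from rfl,
        pvG_unfold, if_neg hi]
  | succ fuel ih =>
    intro i bu ib hd hbu
    rw [pvBLoop_unfold, pvG_unfold]
    by_cases hi : i < cs.length
    · rw [if_pos hi, if_pos hi]
      have hreach : (pvReach cs patterns).getD i 0 = pvBest cs patterns i := by
        unfold pvReach
        simp [List.getD_eq_getElem?_getD, List.getElem?_map, List.getElem?_range, hi]
      have hbu' : (if i + (pvReach cs patterns).getD i 0 > bu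
            then i + (pvReach cs patterns).getD i 0 else bu) = pvPM cs patterns (i + 1) := by
        rw [hreach, hbu, pvPM]
        rcases Nat.le_total (pvPM cs patterns i) (i + pvBest cs patterns i) with hle | hle
        · rw [Nat.max_eq_right hle]; split <;> omega
        · rw [Nat.max_eq_left hle]; split <;> omega
      rw [hbu']
      have hrec := fun ib' => ih (i + 1) (pvPM cs patterns (i + 1)) ib' (by omega) rfl
      by_cases hm : i < pvPM cs patterns (i + 1)
      · rw [if_pos hm]
        have : decide (i < pvPM cs patterns (i + 1)) = true := decide_eq_true hm
        simp only [this]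
        rw [hrec true]
        cases ib <;> simp
      · rw [if_neg hm]
        have : decide (i < pvPM cs patterns (i + 1)) = false :=
          decide_eq_false hm
        simp only [this]
        rw [hrec false]
        cases ib <;> simp
    · rw [if_neg hi, if_neg hi]

theorem pvG_run (cs : List Char) (mask : Nat → Bool) (e : Nat) (he : e ≤ cs.length)
    (hend : e = cs.length ∨ mask e = false) :
    ∀ j, j ≤ e → (∀ t, j ≤ t → t < e → mask t = true) →
      pvG cs mask j true =
        (List.take (e - j) (cs.drop j)) ++ "</b>".toList ++ pvG cs mask e false := by
  have hbase : pvG cs mask e true = "</b>".toList ++ pvG cs mask e false := by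
    rcases hend with rfl | hfalse
    · have hj : ¬ cs.length < cs.length := by omega
      rw [pvG_unfold cs mask cs.length true, if_neg hj]
      rw [show pvG cs mask cs.length false = [] by rw [pvG_unfold, if_neg hj]; simp]
      simp
    · by_cases hj : e < cs.length
      · rw [pvG_unfold cs mask e true, if_pos hj]
        rw [show pvG cs mask e false = [] ++ [cs.getD e ' '] ++ pvG cs mask (e + 1) (mask e) by
          rw [pvG_unfold cs mask e false, if_pos hj, hfalse]; simp]
        rw [hfalse]
        simp
      · rw [pvG_unfold cs mask e true, if_neg hj]
        rw [show pvG cs mask e false = [] by rw [pvG_unfold, if_neg hj]; simp]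
        simp
  have aux : ∀ d j, e - j ≤ d → j ≤ e → (∀ t, j ≤ t → t < e → mask t = true) →
      pvG cs mask j true =
        (List.take (e - j) (cs.drop j)) ++ "</b>".toList ++ pvG cs mask e false := by
    intro d
    induction d with
    | zero =>
      intro j hd hje hall
      have hje' : j = e := by omega
      subst hje'
      simpa using hbase
    | succ d ih =>
      intro j hd hje hall
      by_cases hje' : j = e
      · subst hje'
        simpa using hbase
      · have hjlt : j < e := by omega
        have hjcs : j < cs.length := by omega
        rw [pvG_unfold cs mask j true, if_pos hjcs, hall j (le_refl j) hjlt]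
        rw [ih (j + 1) (by omega) (by omega) (fun t h1 h2 => hall t (by omega) h2)]
        rw [List.drop_eq_getElem_cons hjcs, List.getD_eq_getElem _ _ hjcs,
            show e - j = (e - (j + 1)) + 1 by omega, List.take_succ_cons]
        simp
  intro j hje hall
  exact aux e j (by omega) hje hall

theorem pvPhase2_eq_G (cs : List Char) (found : List Bool) (hlen : found.length = cs.length) :
    ∀ fuel i, cs.length ≤ i + fuel →
      pvPhase2 cs found fuel i = pvG cs (fun j => found.getD j false) i false := by
  intro fuel
  induction fuel with
  | zero =>
    intro i hd
    have hi : ¬ i < cs.length := by omega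
    rw [show pvPhase2 cs found 0 i = [] from rfl, pvG_unfold, if_neg hi]
    simp
  | succ fuel ih =>
    intro i hd
    by_cases hi : i < cs.length
    · rw [pvPhase2_unfold, pvG_unfold, if_pos hi, if_pos hi]
      by_cases hf : found.getD i false = false
      · rw [if_pos hf, ih (i + 1) (by omega)]
        have hf' : found[i]?.getD false = false := by
          simpa [List.getD_eq_getElem?_getD] using hf
        simp [hf']
      · have hft : found.getD i false = true := by
          cases h' : found.getD i false
          · exact absurd h' hf
          · rfl
        rw [if_neg hf]
        obtain ⟨hge, hle, hall, hend'⟩ :=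
          pvRunEnd_spec cs.length found (cs.length + 1) i (by omega)
        have hgt : i < pvRunEnd cs.length found (cs.length + 1) i := by
          have := pvRunEnd_gt cs.length found cs.length i hi hft
          exact this
        have hle' : pvRunEnd cs.length found (cs.length + 1) i ≤ cs.length := hle (by omega)
        have hrun := pvG_run cs (fun j => found.getD j false)
            (pvRunEnd cs.length found (cs.length + 1) i) hle'
            (by rcases Nat.lt_or_ge (pvRunEnd cs.length found (cs.length + 1) i) cs.length
                  with h' | h'
                · exact Or.inr (hend' h')
                · exact Or.inl (by omega))
            (i + 1) (by omega) (fun t h1 h2 => hall t (by omega) h2)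
        rw [ih (pvRunEnd cs.length found (cs.length + 1) i) (by omega)]
        rw [PySem.List.slice_natCast]
        rw [List.drop_eq_getElem_cons hi,
            show pvRunEnd cs.length found (cs.length + 1) i - i
              = (pvRunEnd cs.length found (cs.length + 1) i - (i + 1)) + 1 by omega,
            List.take_succ_cons]
        have hft' : found[i]?.getD false = true := by
          simpa [List.getD_eq_getElem?_getD] using hft
        have hrun' := hrun
        simp only [List.getD_eq_getElem?_getD] at hrun'
        simp [hft', hrun', hi]
    · rw [pvPhase2_unfold, pvG_unfold, if_neg hi, if_neg hi]
      simp

theorem pvMasks_agree (cs : List Char) (patterns : List String) (j : Nat) (hj : j < cs.length) :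
    (pvPhase1 cs patterns).getD j false = decide (j < pvPM cs patterns (j + 1)) := by
  by_cases h : pvCovered cs patterns j
  · rw [(pvPhase1_getD cs patterns j hj).mpr h,
        decide_eq_true ((pvMaskB_iff cs patterns j).mpr h)]
  · have hA : (pvPhase1 cs patterns).getD j false = false := by
      cases hb : (pvPhase1 cs patterns).getD j false
      · rfl
      · exact absurd ((pvPhase1_getD cs patterns j hj).mp hb) h
    have hB : decide (j < pvPM cs patterns (j + 1)) = false :=
      decide_eq_false (fun hx => h ((pvMaskB_iff cs patterns j).mp hx))
    rw [hA, hB]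

theorem pvPhase1_length (cs : List Char) (patterns : List String) :
    (pvPhase1 cs patterns).length = cs.length := by
  unfold pvPhase1
  have aux : ∀ (ps : List String) (st : List Bool × PySem.Set String),
      st.1.length = cs.length → (List.foldl (pvStep cs) st ps).1.length = cs.length := by
    intro ps
    induction ps with
    | nil => intro st h; exact h
    | cons a t ih =>
      intro st h
      rw [List.foldl_cons]
      exact ih _ (by rw [pvStep_fst_length]; exact h)
  exact aux patterns _ (by simp)

-- ===== VERDICT (by name: the statement is the Claim_ definition above) =====
theorem solve_spec : Claim_equal_solve := by
  unfold Claim_equal_solve Spec_solve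
  intro text patterns _
  unfold solve solve_alt
  by_cases hcase : text = "" ∨ patterns = []
  · rw [if_pos hcase]
    have hmaskfalse : ∀ j, j < text.toList.length →
        (fun j => decide (j < pvPM text.toList patterns (j + 1))) j = false := by
      intro j hj
      apply decide_eq_false
      intro hx
      obtain ⟨p, hp, k, _, _, _⟩ := (pvMaskB_iff text.toList patterns j).mp hx
      rcases hcase with hc | hc
      · subst hc; simp at hj
      · subst hc; simp at hp
    rw [pvBLoop_eq_G text.toList patterns text.toList.length 0 0 false (by omega) rfl]
    rw [pvG_all_false _ _ hmaskfalse 0, List.drop_zero]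
    simp
  · rw [if_neg hcase]
    congr 1
    rw [pvPhase2_eq_G text.toList (pvPhase1 text.toList patterns)
          (pvPhase1_length text.toList patterns) (text.toList.length + 1) 0 (by omega)]
    rw [pvG_congr text.toList _ _
          (fun j hj => pvMasks_agree text.toList patterns j hj) 0 false]
    rw [pvBLoop_eq_G text.toList patterns text.toList.length 0 0 false (by omega) rfl]
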